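-- pv_equiv track=rewrite | github.com/msokur/hsi-experiments | configuration/configloader_base.py | concat_dict
-- ===== SOURCE A (Python) =====
-- def concat_dict(dict1: dict, dict2: dict) -> dict:
--     """Concatenate dictionary
--
--     Concatenate two dictionary a returns a new one with both datas.
--
--     :param dict1: First dictionary.
--     :param dict2: Second dictionary.
--
--     :returns: Combined dictionary.
--
--     :raises ValueError: If one key is in both dictionary.
--     """
--     dict_temp = dict1.copy()
--     for key, value in dict2.items():
--         if key not in dict1:
--             dict_temp[key] = value
--         else:
--             raise ValueError(f'The key {key} is already in the Dictionary!')
--     return dict_temp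
-- ===== SOURCE B (Python) =====
-- def concat_dict(dict1: dict, dict2: dict) -> dict:
--     merged = {**dict1, **dict2}
--     if len(merged) == len(dict1) + len(dict2):
--         return merged
--     key = next(k for k in dict2 if k in dict1)
--     raise ValueError(f'The key {key} is already in the Dictionary!')
-- ===== Notes on version B (the rewrite author's own statement) =====
-- stated objective: idiomatic
-- what changed: B merges unconditionally with {**dict1, **dict2} and detects key overlap by a single cardinality check (len(merged) vs len(dict1)+len(dict2)); the success path has no per-key membership test, unlike A's interleaved check-and-insert loop, and only the failure path searches for the offending key to raise the identical ValueError.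
import Mathlib
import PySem

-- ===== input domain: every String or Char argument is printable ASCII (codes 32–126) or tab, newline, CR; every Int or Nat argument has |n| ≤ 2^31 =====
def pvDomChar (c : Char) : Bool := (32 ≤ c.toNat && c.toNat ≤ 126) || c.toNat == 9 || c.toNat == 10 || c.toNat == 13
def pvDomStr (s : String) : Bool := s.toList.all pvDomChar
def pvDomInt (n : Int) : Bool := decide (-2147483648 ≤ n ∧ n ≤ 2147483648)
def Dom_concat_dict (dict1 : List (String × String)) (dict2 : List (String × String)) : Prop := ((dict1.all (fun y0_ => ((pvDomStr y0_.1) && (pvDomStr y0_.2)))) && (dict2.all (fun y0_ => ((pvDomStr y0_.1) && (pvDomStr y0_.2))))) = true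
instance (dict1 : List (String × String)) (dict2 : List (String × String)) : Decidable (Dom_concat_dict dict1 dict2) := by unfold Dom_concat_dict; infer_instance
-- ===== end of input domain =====

-- B merges unconditionally, then detects key overlap by one cardinality check instead of A's per-key membership loop (idiomatic; same cost).


-- ===== PORT A =====
-- dict_temp = dict1.copy(); for key, value in dict2.items(): if key not in dict1: dict_temp[key] = value else: raise
-- (the 'raise' branch is excluded by Pre_; the port leaves the accumulator unchanged there)
def concat_dict (dict1 : List (String × String)) (dict2 : List (String × String)) : List (String × String) :=
  let d1 : PySem.Dict String String := PySem.Dict.ofList dict1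
  let dict_temp :=
    ((PySem.Dict.ofList dict2 : PySem.Dict String String).items).foldl
      (fun d kv => if !(d1.contains kv.1) then d.insert kv.1 kv.2 else d) d1
  dict_temp.items

-- ===== PORT B =====
-- merged = {**dict1, **dict2}; if len(merged) == len(dict1)+len(dict2): return merged; else raise
-- (the 'raise' branch is excluded by Pre_; the port returns [] there)
def concat_dict_alt (dict1 : List (String × String)) (dict2 : List (String × String)) : List (String × String) :=
  let d1 : PySem.Dict String String := PySem.Dict.ofList dict1
  let d2 : PySem.Dict String String := PySem.Dict.ofList dict2
  let merged := d1.update d2.items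
  if merged.size = d1.size + d2.size then merged.items else []

-- ===== PRECONDITION & SPEC =====
-- Pre_ excludes exactly the inputs with overlapping keys, on which Python A raises ValueError (and B raises the same).
def Pre_concat_dict (dict1 : List (String × String)) (dict2 : List (String × String)) : Prop :=
  ∀ p ∈ dict2, ∀ q ∈ dict1, p.1 ≠ q.1
instance (dict1 : List (String × String)) (dict2 : List (String × String)) : Decidable (Pre_concat_dict dict1 dict2) := by unfold Pre_concat_dict; infer_instance
def pvWitness_concat_dict : (List (String × String)) × (List (String × String)) :=
  ([("a", "1"), ("b", "2")], [("c", "3")])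
def Spec_concat_dict (dict1 : List (String × String)) (dict2 : List (String × String)) (out : List (String × String)) : Prop := out = concat_dict_alt dict1 dict2
instance (dict1 : List (String × String)) (dict2 : List (String × String)) (out : List (String × String)) : Decidable (Spec_concat_dict dict1 dict2 out) := by unfold Spec_concat_dict; infer_instance

-- ===== CLAIM (what is proved, stated in full; the proofs are below) =====
def Claim_equal_concat_dict : Prop := ∀ (dict1 : List (String × String)) (dict2 : List (String × String)), Dom_concat_dict dict1 dict2 → Pre_concat_dict dict1 dict2 → Spec_concat_dict dict1 dict2 (concat_dict dict1 dict2)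

-- ===== LEMMAS AND PROOFS =====

-- keys of a dict built from an association list are the (deduplicated) first components of the list
theorem keys_ofList_pairs (l : List (String × String)) :
    (PySem.Dict.ofList l : PySem.Dict String String).keys
      = PySem.Set.ofList (l.map Prod.fst) := by
  have h := PySem.Dict.keys_foldl_insert_key (ν := String) l Prod.fst
      (fun _ p => p.2) PySem.Dict.empty
  simpa [PySem.Dict.ofList, PySem.Dict.update, PySem.Set.update_nil_left,
    PySem.Dict.keys_empty] using h

-- under Pre_, no key appearing in (ofList dict2) is contained in (ofList dict1)
theorem contains_false_of_pre (dict1 dict2 : List (String × String))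
    (hpre : Pre_concat_dict dict1 dict2) (k : String)
    (hk : k ∈ (PySem.Dict.ofList dict2 : PySem.Dict String String).keys) :
    (PySem.Dict.ofList dict1 : PySem.Dict String String).contains k = false := by
  rw [keys_ofList_pairs, PySem.Set.mem_ofList, List.mem_map] at hk
  obtain ⟨p, hp, hpk⟩ := hk
  by_contra h
  have hc : (PySem.Dict.ofList dict1 : PySem.Dict String String).contains k = true := by
    cases hcc : (PySem.Dict.ofList dict1 : PySem.Dict String String).contains k
    · exact absurd hcc h
    · rfl
  rw [PySem.Dict.contains_iff_mem_keys, keys_ofList_pairs, PySem.Set.mem_ofList,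
    List.mem_map] at hc
  obtain ⟨q, hq, hqk⟩ := hc
  exact hpre p hp q hq (by rw [hpk, hqk])

-- under Pre_, the unconditional update appends: its items are d1.items ++ d2.items
theorem update_items_of_pre (dict1 dict2 : List (String × String))
    (hpre : Pre_concat_dict dict1 dict2) :
    ((PySem.Dict.ofList dict1 : PySem.Dict String String).update
        (PySem.Dict.ofList dict2 : PySem.Dict String String).items).items
      = (PySem.Dict.ofList dict1 : PySem.Dict String String).items
          ++ (PySem.Dict.ofList dict2 : PySem.Dict String String).items := by
  have hfresh : ∀ p ∈ (PySem.Dict.ofList dict2 : PySem.Dict String String).items,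
      (PySem.Dict.ofList dict1 : PySem.Dict String String).contains p.1 = false := by
    intro p hp
    exact contains_false_of_pre dict1 dict2 hpre p.1
      (PySem.Dict.mem_keys_of_mem_items _ hp)
  have hnodup :
      (((PySem.Dict.ofList dict2 : PySem.Dict String String).items).map Prod.fst).Nodup := by
    simpa [PySem.Dict.keys] using
      (PySem.Dict.nodup_keys_ofList (dict2) : _)
  have h := PySem.Dict.items_foldl_insert_fresh
      (l := (PySem.Dict.ofList dict2 : PySem.Dict String String).items)
      (k := Prod.fst) (v := Prod.snd)
      (d := (PySem.Dict.ofList dict1 : PySem.Dict String String)) hfresh hnodup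
  simpa [PySem.Dict.update] using h

-- ===== VERDICT (by name: the statement is the Claim_ definition above) =====
theorem concat_dict_spec : Claim_equal_concat_dict := by
  intro dict1 dict2 _ hpre
  unfold Spec_concat_dict concat_dict concat_dict_alt
  dsimp only
  have hupd := update_items_of_pre dict1 dict2 hpre
  have hsize :
      ((PySem.Dict.ofList dict1 : PySem.Dict String String).update
          (PySem.Dict.ofList dict2 : PySem.Dict String String).items).size
        = (PySem.Dict.ofList dict1 : PySem.Dict String String).size
            + (PySem.Dict.ofList dict2 : PySem.Dict String String).size := by
    simp [PySem.Dict.size, hupd]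
  rw [if_pos hsize, hupd]
  -- A's conditional-insert loop is the plain update loop under Pre_
  have hA :
      ((PySem.Dict.ofList dict2 : PySem.Dict String String).items).foldl
          (fun d kv => if !((PySem.Dict.ofList dict1 : PySem.Dict String String).contains kv.1)
                       then d.insert kv.1 kv.2 else d)
          (PySem.Dict.ofList dict1)
        = (PySem.Dict.ofList dict1 : PySem.Dict String String).update
            (PySem.Dict.ofList dict2 : PySem.Dict String String).items := by
    unfold PySem.Dict.update
    apply PySem.List.foldl_congr_mem
    intro acc kv hkv
    have hc := contains_false_of_pre dict1 dict2 hpre kv.1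
      (PySem.Dict.mem_keys_of_mem_items _ hkv)
    simp [hc]
  rw [hA, hupd]
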